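-- pv_equiv track=rewrite | github.com/arin17bishwa/myCP_sols | CF/1326B.py | func
-- ===== SOURCE A (Python) =====
-- def func(n, b):
--     a = [0] * n
--     x = -1
--     x = max(x, b[0])
--     a[0] = b[0]
--     for i in range(1, n):
--         x = max(x, a[i - 1])
--         a[i] = x + b[i]
--     return a
-- ===== SOURCE B (Python) =====
-- def func(n, b):
--     a = [0] * n
--     a[0] = b[0]
--     pref = [max(-1, b[0])]
--     for j in range(1, n):
--         pref.append(pref[-1] + max(0, b[j]))
--     for i in range(1, n):
--         a[i] = b[i] + pref[i - 1]
--     return a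
-- ===== Notes on version B (the rewrite author's own statement) =====
-- stated objective: alternative
-- what changed: Replaces the running prefix-max accumulator with an explicitly built prefix-sum table of clamped values (pref[j] = max(-1,b[0]) + sum of max(0,b[1..j])), then fills the output in a separate second pass as a[i] = b[i] + pref[i-1].
import Mathlib
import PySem

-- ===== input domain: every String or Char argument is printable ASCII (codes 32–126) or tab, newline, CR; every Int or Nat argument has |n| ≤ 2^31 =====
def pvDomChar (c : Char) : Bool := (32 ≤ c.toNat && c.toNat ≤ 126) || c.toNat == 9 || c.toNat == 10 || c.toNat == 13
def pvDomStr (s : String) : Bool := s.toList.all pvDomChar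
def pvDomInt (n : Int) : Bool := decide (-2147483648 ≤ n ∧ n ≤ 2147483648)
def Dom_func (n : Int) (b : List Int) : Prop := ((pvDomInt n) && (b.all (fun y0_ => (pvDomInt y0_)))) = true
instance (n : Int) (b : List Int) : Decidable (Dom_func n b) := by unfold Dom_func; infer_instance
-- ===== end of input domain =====

-- B keeps an explicit prefix-sum table of the clamped increments max(0,b[j]) and fills the
-- output in a second pass (a[i] = b[i] + pref[i-1]) instead of A's single pass with a running max.

-- ===== PORT A =====
def func (n : Int) (b : List Int) : List Int :=
  let a : List Int := List.replicate n.toNat 0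
  let x : Int := -1
  let x : Int := max x (PySem.List.pyGetD b 0 0)
  let a := PySem.List.pySetD a 0 (PySem.List.pyGetD b 0 0)
  let s := (PySem.List.pyRange 1 n 1).foldl (fun (st : Int × List Int) i =>
    let x := max st.1 (PySem.List.pyGetD st.2 (i - 1) 0)
    let a := PySem.List.pySetD st.2 i (x + PySem.List.pyGetD b i 0)
    (x, a)) (x, a)
  s.2

-- ===== PORT B =====
def func_alt (n : Int) (b : List Int) : List Int :=
  let a : List Int := List.replicate n.toNat 0
  let a := PySem.List.pySetD a 0 (PySem.List.pyGetD b 0 0)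
  let pref : List Int := (PySem.List.pyRange 1 n 1).foldl (fun p j =>
    p ++ [PySem.List.pyGetD p (-1) 0 + max 0 (PySem.List.pyGetD b j 0)])
    [max (-1) (PySem.List.pyGetD b 0 0)]
  (PySem.List.pyRange 1 n 1).foldl (fun a i =>
    PySem.List.pySetD a i (PySem.List.pyGetD b i 0 + PySem.List.pyGetD pref (i - 1) 0)) a

-- ===== PRECONDITION & SPEC =====
-- A raises IndexError when n < 1 (assignment a[0] on an empty list) or n > len(b) (read b[i]).
def Pre_func (n : Int) (b : List Int) : Prop := 1 ≤ n ∧ n ≤ (b.length : Int)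
instance (n : Int) (b : List Int) : Decidable (Pre_func n b) := by unfold Pre_func; infer_instance
def pvWitness_func : Int × List Int := (3, [1, -2, 5])

def Spec_func (n : Int) (b : List Int) (out : List Int) : Prop := out = func_alt n b
instance (n : Int) (b : List Int) (out : List Int) : Decidable (Spec_func n b out) := by unfold Spec_func; infer_instance

-- ===== CLAIM (what is proved, stated in full; the proofs are below) =====
def Claim_equal_func : Prop := ∀ (n : Int) (b : List Int), Dom_func n b → Pre_func n b → Spec_func n b (func n b)

-- ===== LEMMAS AND PROOFS =====

-- Mv b k = the value of A's running max just after a[k+1] would be computed: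
-- Mv 0 = max(-1, b[0]);  Mv (k+1) = Mv k + max 0 b[k+1].
def Mv (b : List Int) : Nat → Int
  | 0 => max (-1) (PySem.List.pyGetD b 0 0)
  | (k+1) => Mv b k + max 0 (PySem.List.pyGetD b ((k : Int) + 1) 0)

-- the intended i-th output value
def outF (b : List Int) (i : Nat) : Int :=
  if i = 0 then PySem.List.pyGetD b 0 0 else PySem.List.pyGetD b (i : Int) 0 + Mv b (i - 1)

-- output array after the first k cells have been filled
def refOut (b : List Int) (m k : Nat) : List Int :=
  (List.range m).map (fun i => if i < k then outF b i else 0)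

lemma length_refOut (b : List Int) (m k : Nat) : (refOut b m k).length = m := by
  simp [refOut]

lemma refOut_zero (b : List Int) (m : Nat) : refOut b m 0 = List.replicate m 0 := by
  unfold refOut
  apply List.ext_getElem
  · simp
  · intro i h1 h2
    simp

lemma setOut (b : List Int) (m k : Nat) :
    PySem.List.pySetD (refOut b m k) ((k : Nat) : Int) (outF b k) = refOut b m (k + 1) := by
  rw [PySem.List.pySetD_natCast]
  apply List.ext_getElem
  · simp [refOut]
  · intro i h1 h2
    simp only [refOut, List.getElem_set, List.getElem_map, List.getElem_range]
    by_cases hik : k = i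
    · subst hik; simp
    · rw [if_neg hik]
      split_ifs <;> first | rfl | omega

lemma getD_refOut (b : List Int) (m k : Nat) (i : Int) (h0 : 0 ≤ i) (h1 : i < (k : Int))
    (h2 : (k : Int) ≤ (m : Int)) :
    PySem.List.pyGetD (refOut b m k) i 0 = outF b i.toNat := by
  rw [PySem.List.pyGetD_eq_getElem _ 0 h0 (by rw [length_refOut]; omega)]
  simp only [refOut, List.getElem_map, List.getElem_range]
  rw [if_pos (by omega)]

lemma getD_mapMv (b : List Int) (m : Nat) (i : Int) (h0 : 0 ≤ i) (h1 : i < (m : Int)) :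
    PySem.List.pyGetD ((List.range m).map (Mv b)) i 0 = Mv b i.toNat := by
  rw [PySem.List.pyGetD_eq_getElem _ 0 h0 (by simp; omega)]
  simp

-- A's loop invariant: after processing i = 1 .. k-1, the state is (Mv (k-2), refOut k).
lemma loopA (b : List Int) (m : Nat) (k : Nat) (h1 : 1 ≤ k) (h2 : k ≤ m) :
    (PySem.List.pyRange 1 (k : Int) 1).foldl (fun (st : Int × List Int) i =>
      (max st.1 (PySem.List.pyGetD st.2 (i - 1) 0),
        PySem.List.pySetD st.2 i (max st.1 (PySem.List.pyGetD st.2 (i - 1) 0) +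
          PySem.List.pyGetD b i 0))) (Mv b 0, refOut b m 1)
    = (Mv b (k - 2), refOut b m k) := by
  induction k with
  | zero => omega
  | succ k ih =>
    by_cases hk1 : k = 0
    · subst hk1
      simp [PySem.List.pyRange_one_eq_nil]
    · have hk : 1 ≤ k := by omega
      have hkm : k ≤ m := by omega
      have hsplit : PySem.List.pyRange 1 ((k : Int) + 1) 1
          = PySem.List.pyRange 1 (k : Int) 1 ++ [(k : Int)] := by
        exact PySem.List.pyRange_one_succ_right (by omega)
      push_cast
      rw [hsplit, List.foldl_append, ih hk hkm]
      simp only [List.foldl_cons, List.foldl_nil]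
      have hread : PySem.List.pyGetD (refOut b m k) ((k : Int) - 1) 0 = outF b (k - 1) := by
        have := getD_refOut b m k ((k : Int) - 1) (by omega) (by omega) (by exact_mod_cast hkm)
        rw [this]; congr 1; omega
      have hx : max (Mv b (k - 2)) (outF b (k - 1)) = Mv b (k - 1) := by
        by_cases hk2 : k = 1
        · subst hk2
          simp [outF, Mv]
        · have hk2' : 2 ≤ k := by omega
          have hko : k - 1 = (k - 2) + 1 := by omega
          rw [hko]
          simp only [outF, Mv, if_neg (by omega : ¬ (k - 2) + 1 = 0)]
          have hco : ((k - 2 : Nat) : Int) + 1 = ((k - 2 + 1 : Nat) : Int) := by push_cast; ring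
          have hidx : (((k - 2) + 1 : Nat) : Int) = ((k - 2 + 1 : Nat) : Int) := rfl
          have : ((k-2)+1) - 1 = k - 2 := by omega
          rw [this, hco]
          omega
      have hval : Mv b (k - 1) + PySem.List.pyGetD b (k : Int) 0 = outF b k := by
        simp only [outF, if_neg hk1]
        ring
      simp only [hread, hx]
      rw [hval, setOut b m k]

-- B's pref table: after processing j = 1 .. k-1, pref = [Mv 0, …, Mv (k-1)].
lemma loopPref (b : List Int) (k : Nat) (h1 : 1 ≤ k) :
    (PySem.List.pyRange 1 (k : Int) 1).foldl (fun p j =>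
      p ++ [PySem.List.pyGetD p (-1) 0 + max 0 (PySem.List.pyGetD b j 0)])
      [max (-1) (PySem.List.pyGetD b 0 0)]
    = (List.range k).map (Mv b) := by
  induction k with
  | zero => omega
  | succ k ih =>
    by_cases hk1 : k = 0
    · subst hk1
      simp [PySem.List.pyRange_one_eq_nil, List.range_succ, Mv]
    · have hk : 1 ≤ k := by omega
      have hsplit : PySem.List.pyRange 1 ((k : Int) + 1) 1
          = PySem.List.pyRange 1 (k : Int) 1 ++ [(k : Int)] := by
        exact PySem.List.pyRange_one_succ_right (by omega)
      push_cast
      rw [hsplit, List.foldl_append, ih hk]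
      simp only [List.foldl_cons, List.foldl_nil]
      have hlast : PySem.List.pyGetD ((List.range k).map (Mv b)) (-1) 0 = Mv b (k - 1) := by
        have hko : k = (k - 1) + 1 := by omega
        rw [hko, List.range_succ, List.map_append]
        simp [PySem.List.pyGetD_neg_one_append_singleton]
      rw [hlast, List.range_succ, List.map_append]
      have hko : k = (k - 1) + 1 := by omega
      have : Mv b (k - 1) + max 0 (PySem.List.pyGetD b (k : Int) 0) = Mv b k := by
        conv_rhs => rw [hko]
        simp only [Mv]
        have : (((k - 1 : Nat) : Int) + 1) = (k : Int) := by omega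
        rw [this]
      rw [this, List.map_singleton]

-- B's fill loop invariant
lemma loopB (b : List Int) (m : Nat) (k : Nat) (h1 : 1 ≤ k) (h2 : k ≤ m) :
    (PySem.List.pyRange 1 (k : Int) 1).foldl (fun a i =>
      PySem.List.pySetD a i (PySem.List.pyGetD b i 0 +
        PySem.List.pyGetD ((List.range m).map (Mv b)) (i - 1) 0)) (refOut b m 1)
    = refOut b m k := by
  induction k with
  | zero => omega
  | succ k ih =>
    by_cases hk1 : k = 0
    · subst hk1
      simp [PySem.List.pyRange_one_eq_nil]
    · have hk : 1 ≤ k := by omega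
      have hsplit : PySem.List.pyRange 1 ((k : Int) + 1) 1
          = PySem.List.pyRange 1 (k : Int) 1 ++ [(k : Int)] := by
        exact PySem.List.pyRange_one_succ_right (by omega)
      push_cast
      rw [hsplit, List.foldl_append, ih hk (by omega)]
      simp only [List.foldl_cons, List.foldl_nil]
      have hpref : PySem.List.pyGetD ((List.range m).map (Mv b)) ((k : Int) - 1) 0
          = Mv b (k - 1) := by
        have := getD_mapMv b m ((k : Int) - 1) (by omega) (by omega)
        rw [this]; congr 1; omega
      have hval : PySem.List.pyGetD b (k : Int) 0 + Mv b (k - 1) = outF b k := by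
        simp only [outF, if_neg hk1]
      rw [hpref, hval, setOut b m k]

-- ===== VERDICT (by name: the statement is the Claim_ definition above) =====
theorem func_spec : Claim_equal_func := by
  intro n b _ hpre
  obtain ⟨hn1, hnb⟩ := hpre
  unfold Spec_func func func_alt
  have hm1 : 1 ≤ n.toNat := by omega
  have hcast : ((n.toNat : Nat) : Int) = n := by omega
  have hinit : PySem.List.pySetD (List.replicate n.toNat 0) 0 (PySem.List.pyGetD b 0 0)
      = refOut b n.toNat 1 := by
    have := setOut b n.toNat 0
    rw [refOut_zero] at this
    simpa [outF] using this
  simp only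
  rw [hinit]
  have hxinit : max (-1 : Int) (PySem.List.pyGetD b 0 0) = Mv b 0 := rfl
  rw [show PySem.List.pyRange 1 n = PySem.List.pyRange 1 ((n.toNat : Nat) : Int) from by rw [hcast]]
  rw [loopPref b n.toNat hm1]
  rw [hxinit]
  rw [loopA b n.toNat n.toNat hm1 (le_refl _)]
  rw [loopB b n.toNat n.toNat hm1 (le_refl _)]
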